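-- pv_equiv track=rewrite | github.com/Magmose/Bitbucket-Mining-Analytic | analysis_script.py | merge_sub_categories
-- ===== SOURCE A (Python) =====
-- def merge_sub_categories(input_dict):
--     merged_dict = {}
--     for key in input_dict:
--         first_letter = key[0]
--         if first_letter in merged_dict:
--             merged_dict[first_letter].extend(input_dict[key])
--         else:
--             merged_dict[first_letter] = input_dict[key].copy()
--     return merged_dict
-- ===== SOURCE B (Python) =====
-- def merge_sub_categories(input_dict):
--     letters = []
--     for key in input_dict:
--         if key[0] not in letters:
--             letters.append(key[0])
--     return {c: [v for k in input_dict if k[0] == c for v in input_dict[k]]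
--             for c in letters}
-- ===== Notes on version B (the rewrite author's own statement) =====
-- stated objective: alternative
-- what changed: Instead of A's single pass that accumulates into a dict by extend-or-copy, B first collects the distinct first letters in order of first appearance and then, for each letter, re-scans the whole input with a filter-and-flatten comprehension collecting every value of every key starting with that letter.
import Mathlib
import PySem

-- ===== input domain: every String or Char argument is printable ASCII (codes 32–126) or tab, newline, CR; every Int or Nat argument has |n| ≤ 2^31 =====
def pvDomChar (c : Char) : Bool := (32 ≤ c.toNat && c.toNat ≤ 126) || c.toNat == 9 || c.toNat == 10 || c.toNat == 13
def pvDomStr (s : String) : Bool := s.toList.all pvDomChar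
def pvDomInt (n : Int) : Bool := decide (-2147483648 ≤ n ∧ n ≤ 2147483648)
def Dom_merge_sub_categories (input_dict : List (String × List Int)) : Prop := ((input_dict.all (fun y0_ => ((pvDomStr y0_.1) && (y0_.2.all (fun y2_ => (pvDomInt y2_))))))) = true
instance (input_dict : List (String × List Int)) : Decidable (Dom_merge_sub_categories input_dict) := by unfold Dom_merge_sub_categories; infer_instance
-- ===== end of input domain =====

-- B replaces A's single accumulate-into-a-dict pass by: collect the distinct first letters
-- in order of first appearance, then for each letter re-scan the whole input and flatten the
-- value lists of the matching keys (alternative decomposition; not faster).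

-- key[0] as a one-character string; "" stands for Python's IndexError on a zero-length key (excluded by Pre_)
def pvFirst (s : String) : String :=
  match PySem.Str.pyGet? s 0 with
  | some c => String.ofList [c]
  | none => ""

-- ===== PORT A =====
def merge_sub_categories (input_dict : List (String × List Int)) : List (String × List Int) :=
  let d := PySem.Dict.mk input_dict
  (input_dict.foldl (fun merged kv =>
      let first_letter := pvFirst kv.1
      match merged.get? first_letter with
      | some vs => merged.insert first_letter (vs ++ PySem.Dict.getD d kv.1 [])
      | none    => merged.insert first_letter (PySem.Dict.getD d kv.1 []))
    PySem.Dict.empty).items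

-- ===== PORT B =====
def merge_sub_categories_alt (input_dict : List (String × List Int)) : List (String × List Int) :=
  let d := PySem.Dict.mk input_dict
  let letters : List String := input_dict.foldl (fun ls kv =>
      if ls.contains (pvFirst kv.1) then ls else ls ++ [pvFirst kv.1]) []
  letters.map (fun c => (c, input_dict.flatMap (fun kv =>
      if pvFirst kv.1 == c then PySem.Dict.getD d kv.1 [] else [])))

-- ===== PRECONDITION & SPEC =====
-- Pre_ excludes (a) a zero-length key, on which Python A raises IndexError at key[0], and
-- (b) duplicate keys, which cannot occur in the Python dict this association list represents.
def Pre_merge_sub_categories (input_dict : List (String × List Int)) : Prop :=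
  (∀ p ∈ input_dict, p.1 ≠ "") ∧ (input_dict.map Prod.fst).Nodup
instance (input_dict : List (String × List Int)) : Decidable (Pre_merge_sub_categories input_dict) := by
  unfold Pre_merge_sub_categories; infer_instance
def pvWitness_merge_sub_categories : (List (String × List Int)) :=
  [("apple", [1, 2]), ("ant", [3]), ("bee", [4])]
def Spec_merge_sub_categories (input_dict : List (String × List Int)) (out : List (String × List Int)) : Prop := out = merge_sub_categories_alt input_dict
instance (input_dict : List (String × List Int)) (out : List (String × List Int)) : Decidable (Spec_merge_sub_categories input_dict out) := by unfold Spec_merge_sub_categories; infer_instance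

-- ===== CLAIM (what is proved, stated in full; the proofs are below) =====
def Claim_equal_merge_sub_categories : Prop := ∀ (input_dict : List (String × List Int)), Dom_merge_sub_categories input_dict → Pre_merge_sub_categories input_dict → Spec_merge_sub_categories input_dict (merge_sub_categories input_dict)

-- ===== LEMMAS AND PROOFS =====

-- the distinct first letters of l, in order of first appearance, appended after ls
def pvLetters (l : List (String × List Int)) (ls : List String) : List String :=
  l.foldl (fun ls kv => if ls.contains (pvFirst kv.1) then ls else ls ++ [pvFirst kv.1]) ls

-- concatenation of the value lists (under f) of the keys of l whose first letter is c
def pvF (f : String → List Int) (c : String) (l : List (String × List Int)) : List Int :=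
  l.flatMap (fun kv => if pvFirst kv.1 == c then f kv.1 else [])

theorem pvLetters_mono (l : List (String × List Int)) (ls : List String) (x : String)
    (hx : x ∈ ls) : x ∈ pvLetters l ls := by
  induction l generalizing ls with
  | nil => exact hx
  | cons kv rest ih =>
    simp only [pvLetters, List.foldl_cons]
    apply ih
    split_ifs <;> simp [hx]

theorem pvLetters_mem (l : List (String × List Int)) (ls : List String)
    (kv : String × List Int) (hkv : kv ∈ l) : pvFirst kv.1 ∈ pvLetters l ls := by
  induction l generalizing ls with
  | nil => cases hkv
  | cons hd rest ih =>
    simp only [pvLetters, List.foldl_cons]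
    rcases List.mem_cons.mp hkv with hkv | hkv
    · subst hkv
      apply pvLetters_mono
      split_ifs with h
      · simpa using h
      · simp
    · exact ih _ hkv

theorem pvF_nil (f : String → List Int) (c : String) (l : List (String × List Int))
    (h : ∀ kv ∈ l, pvFirst kv.1 ≠ c) : pvF f c l = [] := by
  induction l with
  | nil => rfl
  | cons kv rest ih =>
    simp only [pvF, List.flatMap_cons]
    rw [if_neg (by simpa using h kv (List.mem_cons_self ..))]
    exact ih (fun kv' h' => h kv' (List.mem_cons_of_mem _ h'))

theorem pvGet?_mk_map_mem (g : String → List Int) (ls : List String) (c : String)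
    (hc : c ∈ ls) :
    (PySem.Dict.mk (ls.map (fun c' => (c', g c')))).get? c = some (g c) := by
  induction ls with
  | nil => cases hc
  | cons a rest ih =>
    simp only [List.map_cons, PySem.Dict.get?_mk_cons]
    by_cases h : a = c
    · subst h; simp
    · rw [if_neg (by simpa using h)]
      refine ih ?_
      rcases List.mem_cons.mp hc with h1 | h1
      · exact absurd h1.symm h
      · exact h1

theorem pvGet?_mk_map_not_mem (g : String → List Int) (ls : List String) (c : String)
    (hc : c ∉ ls) :
    (PySem.Dict.mk (ls.map (fun c' => (c', g c')))).get? c = none := by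
  induction ls with
  | nil => rfl
  | cons a rest ih =>
    simp only [List.map_cons, PySem.Dict.get?_mk_cons]
    rw [if_neg (by simp at hc; simpa using fun h => hc.1 h.symm)]
    exact ih (by simp at hc; simpa using hc.2)

theorem pvFoldA_eq (f : String → List Int) (l : List (String × List Int)) :
    l.foldl (fun merged kv =>
      match merged.get? (pvFirst kv.1) with
      | some vs => merged.insert (pvFirst kv.1) (vs ++ f kv.1)
      | none    => merged.insert (pvFirst kv.1) (f kv.1)) PySem.Dict.empty
    = PySem.Dict.mk ((pvLetters l []).map (fun c => (c, pvF f c l))) := by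
  induction l using List.reverseRecOn with
  | nil => rfl
  | append_singleton l kv ih =>
    rw [List.foldl_append, ih]
    simp only [List.foldl_cons, List.foldl_nil]
    have hlet : pvLetters (l ++ [kv]) [] =
        (if (pvLetters l []).contains (pvFirst kv.1) then pvLetters l []
         else pvLetters l [] ++ [pvFirst kv.1]) := by
      simp [pvLetters, List.foldl_append]
    have hF : ∀ c, pvF f c (l ++ [kv]) =
        pvF f c l ++ (if pvFirst kv.1 == c then f kv.1 else []) := by
      intro c; simp [pvF]
    by_cases hc : pvFirst kv.1 ∈ pvLetters l []
    · rw [pvGet?_mk_map_mem _ _ _ hc]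
      have hcont : (pvLetters l []).contains (pvFirst kv.1) = true := by simpa using hc
      rw [hlet, if_pos hcont]
      apply PySem.Dict.ext
      have hcont' : (PySem.Dict.mk ((pvLetters l []).map
          (fun c => (c, pvF f c l)))).contains (pvFirst kv.1) = true := by
        rw [PySem.Dict.contains_eq_isSome_get?, pvGet?_mk_map_mem _ _ _ hc]; rfl
      rw [PySem.Dict.items_insert_of_contains _ _ hcont']
      show ((pvLetters l []).map (fun c => (c, pvF f c l))).map _ = _
      rw [List.map_map]
      apply List.map_congr_left
      intro c' _
      by_cases h' : c' = pvFirst kv.1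
      · subst h'; simp [hF]
      · have h1 : (c' == pvFirst kv.1) = false := by simpa using h'
        have h2 : (pvFirst kv.1 == c') = false := by
          simp only [beq_eq_false_iff_ne, ne_eq]
          exact fun h => h' h.symm
        simp [Function.comp, h1, h2, hF]
    · rw [pvGet?_mk_map_not_mem _ _ _ hc]
      have hcont : (pvLetters l []).contains (pvFirst kv.1) = false := by simpa using hc
      rw [hlet, if_neg (by simpa using hc)]
      apply PySem.Dict.ext
      have hcont' : (PySem.Dict.mk ((pvLetters l []).map
          (fun c => (c, pvF f c l)))).contains (pvFirst kv.1) = false := by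
        rw [PySem.Dict.contains_eq_isSome_get?, pvGet?_mk_map_not_mem _ _ _ hc]; rfl
      rw [PySem.Dict.items_insert_of_not_contains _ _ hcont']
      show ((pvLetters l []).map (fun c => (c, pvF f c l))) ++ [(pvFirst kv.1, f kv.1)]
          = ((pvLetters l []) ++ [pvFirst kv.1]).map (fun c => (c, pvF f c (l ++ [kv])))
      rw [List.map_append]
      congr 1
      · apply List.map_congr_left
        intro c' hc'
        have hne : (pvFirst kv.1 == c') = false := by
          simp only [beq_eq_false_iff_ne, ne_eq]
          intro h; exact hc (h ▸ hc')
        simp [hF, hne]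
      · have hnil : pvF f (pvFirst kv.1) l = [] := by
          apply pvF_nil
          intro kv' hkv' h
          exact hc (h ▸ pvLetters_mem l [] kv' hkv')
        simp [hF, hnil]

-- ===== VERDICT (by name: the statement is the Claim_ definition above) =====
theorem merge_sub_categories_spec : Claim_equal_merge_sub_categories := by
  intro input_dict _ _
  unfold Spec_merge_sub_categories merge_sub_categories merge_sub_categories_alt
  simp only []
  rw [pvFoldA_eq (fun k => PySem.Dict.getD (PySem.Dict.mk input_dict) k []) input_dict]
  rfl
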